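-- pv_equiv track=rewrite | github.com/yazanyehya/PythonKatasFursa | katas/is_valid_git_tree.py | is_valid_git_tree
-- ===== SOURCE A (Python) =====
-- def is_valid_git_tree(tree_map):
--     parents = set()
--     children = set()
--     for parent, children_list in tree_map.items():
--         parents.add(parent)
--         for child in children_list:
--             children.add(child)
--
--     roots = parents - children
--     if len(roots) != 1:
--         return False
--
--     visited = set()
--     visiting = set()
--     root = next(iter(roots))
--
--     def dfs(node):
--         if node in visiting:
--             return False
--         if node in visited:
--             return True
--
--         visiting.add(node)
--         for neighbor in tree_map.get(node,[]):
--             if not dfs(neighbor):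
--                 return False
--         visiting.remove(node)
--         visited.add(node)
--         return True
--
--     if not dfs(root):
--         return False
--     all_nodes = parents.union(children)
--
--
--     return visited == all_nodes
-- ===== SOURCE B (Python) =====
-- def is_valid_git_tree(tree_map):
--     # Iterative fixed-point peel (Kahn-style) instead of recursive DFS coloring.
--     parents = set(tree_map)
--     children = {c for cs in tree_map.values() for c in cs}
--     if len(parents - children) != 1:
--         return False
--     alive = parents | children
--     for _ in range(len(alive)):
--         alive = {v for v in alive if any(v in tree_map.get(u, []) for u in alive)}
--     return len(alive) == 0
-- ===== Notes on version B (the rewrite author's own statement) =====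
-- stated objective: alternative
-- what changed: Replaces A's recursive DFS with visiting/visited coloring plus reachability check by an iterative Kahn-style fixed-point peel: after checking there is exactly one root, repeatedly delete every node with no surviving in-edge and accept iff the set peels down to empty.
import Mathlib
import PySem

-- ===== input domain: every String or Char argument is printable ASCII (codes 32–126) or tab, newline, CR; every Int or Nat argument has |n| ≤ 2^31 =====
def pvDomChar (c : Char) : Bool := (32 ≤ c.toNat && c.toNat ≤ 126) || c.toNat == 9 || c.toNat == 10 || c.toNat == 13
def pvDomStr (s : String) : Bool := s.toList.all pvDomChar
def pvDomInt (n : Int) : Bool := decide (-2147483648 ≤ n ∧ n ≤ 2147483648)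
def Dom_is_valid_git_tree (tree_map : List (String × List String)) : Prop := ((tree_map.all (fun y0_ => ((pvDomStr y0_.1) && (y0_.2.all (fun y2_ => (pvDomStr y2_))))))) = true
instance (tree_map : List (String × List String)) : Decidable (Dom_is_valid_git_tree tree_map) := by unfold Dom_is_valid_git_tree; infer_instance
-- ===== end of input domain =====

-- B replaces A's recursive DFS coloring by an iterative fixed-point peel (Kahn-style): repeatedly drop
-- nodes with no surviving in-edge; valid iff exactly one root and everything peels away. Objective: alternative.

-- ===== PORT A =====
-- shared helper: Python's tree_map.get(u, []) (first-match dict lookup, exact via PySem.Dict)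
def pvGet (m : List (String × List String)) (u : String) : List String :=
  PySem.Dict.getD (PySem.Dict.mk m) u []

-- Python's recursive dfs with the two mutating sets threaded through; the nested `for neighbor` loop
-- with its early `return False` is pvDfsAList. Fuel only guards Lean termination: the top-level call
-- passes fuel larger than the deepest possible recursion (each nested call strictly grows `visiting`,
-- whose elements all come from keys/children), so the 0-fuel branch is never reached.
mutual
def pvDfsA (m : List (String × List String)) (fuel : Nat) (visiting visited : PySem.Set String)
    (node : String) : Bool × PySem.Set String × PySem.Set String :=
  match fuel with
  | 0 => (false, visiting, visited)
  | fuel + 1 =>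
    if PySem.Set.contains visiting node then (false, visiting, visited)
    else if PySem.Set.contains visited node then (true, visiting, visited)
    else
      match pvDfsAList m fuel (PySem.Set.add visiting node) visited (pvGet m node) with
      | (false, P, V) => (false, P, V)
      | (true, P, V) => (true, PySem.Set.discard P node, PySem.Set.add V node)
      -- visiting.remove(node): node is always present here, so discard = remove
termination_by (fuel, 0)

def pvDfsAList (m : List (String × List String)) (fuel : Nat) (visiting visited : PySem.Set String)
    (cs : List String) : Bool × PySem.Set String × PySem.Set String :=
  match cs with
  | [] => (true, visiting, visited)
  | c :: cs =>
    match pvDfsA m fuel visiting visited c with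
    | (false, P, V) => (false, P, V)
    | (true, P, V) => pvDfsAList m fuel P V cs
termination_by (fuel, cs.length + 1)
end

def is_valid_git_tree (tree_map : List (String × List String)) : Bool :=
  let pc := tree_map.foldl
    (fun (s : PySem.Set String × PySem.Set String) pr =>
      (PySem.Set.add s.1 pr.1, pr.2.foldl PySem.Set.add s.2))
    (PySem.Set.empty, PySem.Set.empty)
  let roots := PySem.Set.diff pc.1 pc.2
  if PySem.Set.len roots ≠ 1 then false
  else
    -- next(iter(roots)): roots is a singleton here, so the value is hash-order independent
    let root := roots.headI
    match pvDfsA tree_map (tree_map.length + (tree_map.flatMap Prod.snd).length + 1)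
        PySem.Set.empty PySem.Set.empty root with
    | (false, _, _) => false
    | (true, _, visited) => PySem.Set.equal visited (PySem.Set.union pc.1 pc.2)

-- ===== PORT B =====
-- one peel round: {v for v in alive if any(v in tree_map.get(u, []) for u in alive)}
def pvPeel (m : List (String × List String)) (alive : PySem.Set String) : PySem.Set String :=
  PySem.Set.ofList (alive.filter (fun v => alive.any (fun u => (pvGet m u).contains v)))

def is_valid_git_tree_alt (tree_map : List (String × List String)) : Bool :=
  let parents := PySem.Set.ofList (tree_map.map Prod.fst)
  let children := PySem.Set.ofList (tree_map.flatMap Prod.snd)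
  if PySem.Set.len (PySem.Set.diff parents children) ≠ 1 then false
  else
    let alive := (List.range (PySem.Set.union parents children).length).foldl
      (fun s _ => pvPeel tree_map s) (PySem.Set.union parents children)
    PySem.Set.len alive == 0

-- ===== PRECONDITION & SPEC =====
-- Pre_ excludes association lists with duplicate keys: a Python dict can never contain them, and the
-- two ports read the shadowed entries differently (both readings are defensible on such lists).
def Pre_is_valid_git_tree (tree_map : List (String × List String)) : Prop :=
  (tree_map.map Prod.fst).Nodup
instance (tree_map : List (String × List String)) : Decidable (Pre_is_valid_git_tree tree_map) := by
  unfold Pre_is_valid_git_tree; infer_instance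

def pvWitness_is_valid_git_tree : (List (String × List String)) := [("a", ["b"]), ("b", [])]

def Spec_is_valid_git_tree (tree_map : List (String × List String)) (out : Bool) : Prop :=
  out = is_valid_git_tree_alt tree_map
instance (tree_map : List (String × List String)) (out : Bool) : Decidable (Spec_is_valid_git_tree tree_map out) := by
  unfold Spec_is_valid_git_tree; infer_instance

-- ===== CLAIM (what is proved, stated in full; the proofs are below) =====
def Claim_equal_is_valid_git_tree : Prop := ∀ (tree_map : List (String × List String)), Dom_is_valid_git_tree tree_map → Pre_is_valid_git_tree tree_map → Spec_is_valid_git_tree tree_map (is_valid_git_tree tree_map)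

-- ===== LEMMAS AND PROOFS =====

-- the edge relation of the map (first-match lookup), and the graph-theoretic vocabulary
def pvE (m : List (String × List String)) (u v : String) : Prop := v ∈ pvGet m u

def pvNodes (m : List (String × List String)) : PySem.Set String :=
  PySem.Set.union (PySem.Set.ofList (m.map Prod.fst)) (PySem.Set.ofList (m.flatMap Prod.snd))

def pvNoCycle (m : List (String × List String)) : Prop :=
  ∀ u, ¬ Relation.TransGen (pvE m) u u

def pvSafe (m : List (String × List String)) (v : String) : Prop :=
  ∀ u, Relation.ReflTransGen (pvE m) v u → ¬ Relation.TransGen (pvE m) u u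

def pvClosed (m : List (String × List String)) (V : List String) : Prop :=
  ∀ u ∈ V, ∀ v, pvE m u v → v ∈ V

lemma pvE_pair {m : List (String × List String)} {u v : String} (h : pvE m u v) :
    ∃ l, (u, l) ∈ m ∧ v ∈ l := by
  unfold pvE pvGet at h
  rw [PySem.Dict.getD_eq_get?_getD] at h
  cases hg : PySem.Dict.get? (PySem.Dict.mk m) u with
  | none => rw [hg] at h; simp at h
  | some l =>
    rw [hg] at h
    exact ⟨l, PySem.Dict.mem_items_of_get?_eq_some _ hg, h⟩

lemma pvE_src_mem {m : List (String × List String)} {u v : String} (h : pvE m u v) :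
    u ∈ m.map Prod.fst := by
  obtain ⟨l, hm, _⟩ := pvE_pair h
  exact List.mem_map.mpr ⟨(u, l), hm, rfl⟩

lemma pvE_tgt_mem {m : List (String × List String)} {u v : String} (h : pvE m u v) :
    v ∈ m.flatMap Prod.snd := by
  obtain ⟨l, hm, hv⟩ := pvE_pair h
  exact List.mem_flatMap.mpr ⟨(u, l), hm, hv⟩

lemma pvE_src_nodes {m : List (String × List String)} {u v : String} (h : pvE m u v) :
    u ∈ pvNodes m := by
  unfold pvNodes
  rw [PySem.Set.mem_union]
  exact Or.inl ((PySem.Set.mem_ofList _ _).mpr (pvE_src_mem h))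

lemma pvE_tgt_nodes {m : List (String × List String)} {u v : String} (h : pvE m u v) :
    v ∈ pvNodes m := by
  unfold pvNodes
  rw [PySem.Set.mem_union]
  exact Or.inr ((PySem.Set.mem_ofList _ _).mpr (pvE_tgt_mem h))

lemma pvE_of_child {m : List (String × List String)} (hk : (m.map Prod.fst).Nodup)
    {v : String} (hv : v ∈ m.flatMap Prod.snd) : ∃ u, pvE m u v := by
  obtain ⟨⟨u, l⟩, hm, hvl⟩ := List.mem_flatMap.mp hv
  refine ⟨u, ?_⟩
  unfold pvE pvGet
  rw [PySem.Dict.getD_of_mem_items _ hm hk]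
  exact hvl

-- pigeonhole: a nonempty finite set in which every element has a predecessor contains a cycle
lemma pv_cycle_of_all_pred (m : List (String × List String)) (S : List String) (hne : S ≠ [])
    (h : ∀ v ∈ S, ∃ u ∈ S, pvE m u v) : ∃ x, Relation.TransGen (pvE m) x x := by
  classical
  -- choose a predecessor function and pigeonhole its iterates
  let g : String → String := fun v => if h' : ∃ u ∈ S, pvE m u v then h'.choose else v
  have hg : ∀ v ∈ S, g v ∈ S ∧ pvE m (g v) v := by
    intro v hv
    have h' : ∃ u ∈ S, pvE m u v := h v hv
    simp only [g, dif_pos h']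
    obtain ⟨hmem, he⟩ := h'.choose_spec
    exact ⟨hmem, he⟩
  let v0 := S.head hne
  have hv0 : v0 ∈ S := S.head_mem hne
  have hiter : ∀ k, g^[k] v0 ∈ S := by
    intro k
    induction k with
    | zero => exact hv0
    | succ k ih => rw [Function.iterate_succ_apply']; exact (hg _ ih).1
  have hstep : ∀ k, pvE m (g^[k + 1] v0) (g^[k] v0) := by
    intro k
    rw [Function.iterate_succ_apply']
    exact (hg _ (hiter k)).2
  have htrans : ∀ i d : Nat, Relation.TransGen (pvE m) (g^[i + d + 1] v0) (g^[i] v0) := by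
    intro i d
    induction d with
    | zero => exact Relation.TransGen.single (hstep i)
    | succ d ih =>
      have : pvE m (g^[i + d + 2] v0) (g^[i + d + 1] v0) := hstep (i + d + 1)
      exact Relation.TransGen.head this ih
  have hcard : S.toFinset.card < (Finset.univ : Finset (Fin (S.length + 1))).card := by
    have := S.toFinset_card_le
    simp only [Finset.card_univ, Fintype.card_fin]
    omega
  obtain ⟨i, -, j, -, hij, heq⟩ :=
    Finset.exists_ne_map_eq_of_card_lt_of_maps_to hcard
      (f := fun k : Fin (S.length + 1) => g^[(k : Nat)] v0)
      (fun k _ => List.mem_toFinset.mpr (hiter k))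
  rcases Nat.lt_or_ge (i : Nat) (j : Nat) with hlt | hge
  · obtain ⟨d, hd⟩ : ∃ d : Nat, (j : Nat) = (i : Nat) + d + 1 := ⟨(j : Nat) - (i : Nat) - 1, by omega⟩
    refine ⟨g^[(j : Nat)] v0, ?_⟩
    have := htrans (i : Nat) d
    rw [← hd, heq] at this
    exact this
  · have hlt' : (j : Nat) < (i : Nat) := by
      rcases Nat.lt_or_ge (j : Nat) (i : Nat) with h' | h'
      · exact h'
      · exact absurd (Fin.ext (by omega)) hij
    obtain ⟨d, hd⟩ : ∃ d : Nat, (i : Nat) = (j : Nat) + d + 1 := ⟨(i : Nat) - (j : Nat) - 1, by omega⟩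
    refine ⟨g^[(i : Nat)] v0, ?_⟩
    have := htrans (j : Nat) d
    rw [← hd, ← heq] at this
    exact this

-- with a unique root and no cycle, every node is reachable from the root
lemma pv_all_reachable {m : List (String × List String)} (hk : (m.map Prod.fst).Nodup) {r : String}
    (hroots : PySem.Set.diff (PySem.Set.ofList (m.map Prod.fst)) (PySem.Set.ofList (m.flatMap Prod.snd)) = [r])
    (hnc : pvNoCycle m) : ∀ v ∈ pvNodes m, Relation.ReflTransGen (pvE m) r v := by
  classical
  by_contra hcon
  push Not at hcon
  obtain ⟨v0, hv0, hv0n⟩ := hcon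
  set U := (pvNodes m).filter (fun v => !(decide (Relation.ReflTransGen (pvE m) r v))) with hU
  have hmemU : ∀ v, v ∈ U ↔ v ∈ pvNodes m ∧ ¬ Relation.ReflTransGen (pvE m) r v := by
    intro v
    simp [hU, List.mem_filter]
  have hne : U ≠ [] := by
    intro h0
    have hm := (hmemU v0).mpr ⟨hv0, hv0n⟩
    rw [h0] at hm
    simp at hm
  have hpred : ∀ v ∈ U, ∃ u ∈ U, pvE m u v := by
    intro v hv
    obtain ⟨hvN, hvr⟩ := (hmemU v).mp hv
    have hvC : v ∈ m.flatMap Prod.snd := by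
      by_contra hvc
      have hvP : v ∈ PySem.Set.ofList (m.map Prod.fst) := by
        rcases (PySem.Set.mem_union _ _ _).mp hvN with h' | h'
        · exact h'
        · exact absurd ((PySem.Set.mem_ofList _ _).mp h') hvc
      have hvd : v ∈ PySem.Set.diff (PySem.Set.ofList (m.map Prod.fst)) (PySem.Set.ofList (m.flatMap Prod.snd)) :=
        (PySem.Set.mem_diff _ _ _).mpr ⟨hvP, fun h' => hvc ((PySem.Set.mem_ofList _ _).mp h')⟩
      rw [hroots] at hvd
      have hvr' : v = r := by simpa using hvd
      exact hvr (hvr' ▸ Relation.ReflTransGen.refl)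
    obtain ⟨u, hu⟩ := pvE_of_child hk hvC
    have hur : ¬ Relation.ReflTransGen (pvE m) r u := fun h' => hvr (h'.tail hu)
    exact ⟨u, (hmemU u).mpr ⟨pvE_src_nodes hu, hur⟩, hu⟩
  obtain ⟨x, hx⟩ := pv_cycle_of_all_pred m U hne hpred
  exact hnc x hx

lemma pvSafe_step {m : List (String × List String)} {node : String}
    (h : ∀ c, pvE m node c → pvSafe m c) : pvSafe m node := by
  intro u hru hcyc
  rcases Relation.ReflTransGen.cases_head hru with heq | ⟨c, hec, hcu⟩
  · subst heq
    obtain ⟨c, hec, hcu⟩ := Relation.TransGen.head'_iff.mp hcyc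
    exact h c hec _ hcu hcyc
  · exact h c hec u hcu hcyc

lemma pvClosed_reach {m : List (String × List String)} {V : List String} (hV : pvClosed m V)
    {u x : String} (hu : u ∈ V) (hr : Relation.ReflTransGen (pvE m) u x) : x ∈ V := by
  induction hr with
  | refl => exact hu
  | tail _ he ih => exact hV _ ih _ he

-- soundness of A's dfs: a True result only ever adds safe nodes to visited
lemma pvDfsA_sound (m : List (String × List String)) : ∀ fuel : Nat,
    (∀ P V node P' V', pvDfsA m fuel P V node = (true, P', V') → (∀ v ∈ V, pvSafe m v) →
      (∀ v ∈ V, v ∈ V') ∧ node ∈ V' ∧ (∀ v ∈ V', pvSafe m v)) ∧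
    (∀ cs P V P' V', pvDfsAList m fuel P V cs = (true, P', V') → (∀ v ∈ V, pvSafe m v) →
      (∀ v ∈ V, v ∈ V') ∧ (∀ c ∈ cs, c ∈ V') ∧ (∀ v ∈ V', pvSafe m v)) := by
  intro fuel
  induction fuel with
  | zero =>
    constructor
    · intro P V node P' V' hres
      simp [pvDfsA] at hres
    · intro cs P V P' V' hres hsafe
      cases cs with
      | nil =>
        simp only [pvDfsAList, Prod.mk.injEq, true_and] at hres
        obtain ⟨rfl, rfl⟩ := hres
        exact ⟨fun v hv => hv, by simp, hsafe⟩
      | cons c cs => simp [pvDfsAList, pvDfsA] at hres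
  | succ fuel ih =>
    have hdfs : ∀ P V node P' V', pvDfsA m (fuel + 1) P V node = (true, P', V') →
        (∀ v ∈ V, pvSafe m v) →
        (∀ v ∈ V, v ∈ V') ∧ node ∈ V' ∧ (∀ v ∈ V', pvSafe m v) := by
      intro P V node P' V' hres hsafe
      simp only [pvDfsA] at hres
      by_cases h1 : node ∈ P
      · rw [if_pos ((PySem.Set.contains_iff _ _).mpr h1)] at hres
        simp at hres
      · rw [if_neg (fun hc => h1 ((PySem.Set.contains_iff _ _).mp hc))] at hres
        by_cases h2 : node ∈ V
        · rw [if_pos ((PySem.Set.contains_iff _ _).mpr h2)] at hres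
          simp only [Prod.mk.injEq, true_and] at hres
          obtain ⟨rfl, rfl⟩ := hres
          exact ⟨fun v hv => hv, h2, hsafe⟩
        · rw [if_neg (fun hc => h2 ((PySem.Set.contains_iff _ _).mp hc))] at hres
          rcases hL : pvDfsAList m fuel (P.add node) V (pvGet m node) with ⟨b, P2, V2⟩
          rw [hL] at hres
          cases b with
          | false => simp at hres
          | true =>
            simp only [Prod.mk.injEq, true_and] at hres
            obtain ⟨rfl, rfl⟩ := hres
            obtain ⟨hVsub, hcs, hsafe2⟩ := ih.2 _ _ _ _ _ hL hsafe
            refine ⟨fun v hv => (PySem.Set.mem_add _ _ _).mpr (Or.inl (hVsub v hv)),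
              (PySem.Set.mem_add _ _ _).mpr (Or.inr rfl), ?_⟩
            intro v hv
            rcases (PySem.Set.mem_add _ _ _).mp hv with hv' | rfl
            · exact hsafe2 v hv'
            · exact pvSafe_step fun c hc => hsafe2 c (hcs c hc)
    refine ⟨hdfs, ?_⟩
    intro cs
    induction cs with
    | nil =>
      intro P V P' V' hres hsafe
      simp only [pvDfsAList, Prod.mk.injEq, true_and] at hres
      obtain ⟨rfl, rfl⟩ := hres
      exact ⟨fun v hv => hv, by simp, hsafe⟩
    | cons c cs ihcs =>
      intro P V P' V' hres hsafe
      simp only [pvDfsAList] at hres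
      rcases hd : pvDfsA m (fuel + 1) P V c with ⟨b, P2, V2⟩
      rw [hd] at hres
      cases b with
      | false => simp at hres
      | true =>
        obtain ⟨hVsub, hcV2, hsafe2⟩ := hdfs _ _ _ _ _ hd hsafe
        obtain ⟨hV2sub, hcsV', hsafe'⟩ := ihcs _ _ _ _ hres hsafe2
        refine ⟨fun v hv => hV2sub v (hVsub v hv), ?_, hsafe'⟩
        intro c' hc'
        rcases List.mem_cons.mp hc' with rfl | hc''
        · exact hV2sub c' hcV2
        · exact hcsV' c' hc''

-- a duplicate-free list contained in another list is no longer than it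
lemma pv_len_le {P N : List String} (hnd : P.Nodup) (hsub : ∀ p ∈ P, p ∈ N) :
    P.length ≤ N.length := by
  classical
  calc P.length = P.toFinset.card := (List.toFinset_card_of_nodup hnd).symm
    _ ≤ N.toFinset.card := Finset.card_le_card (fun x hx => List.mem_toFinset.mpr (hsub x (List.mem_toFinset.mp hx)))
    _ ≤ N.length := N.toFinset_card_le

lemma pv_discard_append {P : List String} {node : String} (h : node ∉ P) :
    PySem.Set.discard (P ++ [node]) node = P := by
  have : ∀ x ∈ P ++ [node], x ∈ P ∨ x = node := by
    intro x hx
    rcases List.mem_append.mp hx with h' | h'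
    · exact Or.inl h'
    · exact Or.inr (by simpa using h')
  unfold PySem.Set.discard
  rw [List.filter_append]
  have h1 : List.filter (fun y => !y == node) P = P :=
    List.filter_eq_self.mpr (fun a ha => by
      simp only [Bool.not_eq_eq_eq_not, Bool.not_true, beq_eq_false_iff_ne, ne_eq]
      exact fun h' => h (h' ▸ ha))
  have h2 : List.filter (fun y => !y == node) [node] = [] := by simp
  rw [h1, h2, List.append_nil]

-- completeness of A's dfs: with no cycle and enough fuel it returns True, restores visiting,
-- and the new visited set is exactly V ∪ reach(node)
lemma pvDfsA_complete (m : List (String × List String)) (hnc : pvNoCycle m) : ∀ fuel : Nat,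
    (∀ P V node, P.Nodup → (∀ p ∈ P, p ∈ pvNodes m) → node ∈ pvNodes m → pvClosed m V →
      (∀ p ∈ P, Relation.TransGen (pvE m) p node) →
      (pvNodes m).length + 1 ≤ P.length + fuel →
      ∃ V', pvDfsA m fuel P V node = (true, P, V') ∧
        (∀ x, x ∈ V' ↔ x ∈ V ∨ Relation.ReflTransGen (pvE m) node x)) ∧
    (∀ cs P V, P.Nodup → (∀ p ∈ P, p ∈ pvNodes m) → (∀ c ∈ cs, c ∈ pvNodes m) → pvClosed m V →
      (∀ p ∈ P, ∀ c ∈ cs, Relation.TransGen (pvE m) p c) →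
      (pvNodes m).length + 1 ≤ P.length + fuel →
      ∃ V', pvDfsAList m fuel P V cs = (true, P, V') ∧
        (∀ x, x ∈ V' ↔ x ∈ V ∨ ∃ c ∈ cs, Relation.ReflTransGen (pvE m) c x)) := by
  intro fuel
  induction fuel with
  | zero =>
    constructor
    · intro P V node hPnd hPsub _ _ _ hfuel
      exact absurd (pv_len_le hPnd hPsub) (by omega)
    · intro cs P V hPnd hPsub _ _ _ hfuel
      exact absurd (pv_len_le hPnd hPsub) (by omega)
  | succ fuel ih =>
    have hdfs : ∀ P V node, P.Nodup → (∀ p ∈ P, p ∈ pvNodes m) → node ∈ pvNodes m → pvClosed m V →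
        (∀ p ∈ P, Relation.TransGen (pvE m) p node) →
        (pvNodes m).length + 1 ≤ P.length + (fuel + 1) →
        ∃ V', pvDfsA m (fuel + 1) P V node = (true, P, V') ∧
          (∀ x, x ∈ V' ↔ x ∈ V ∨ Relation.ReflTransGen (pvE m) node x) := by
      intro P V node hPnd hPsub hnodeN hVcl hpath hfuel
      have hnotP : node ∉ P := fun h => hnc node (hpath node h)
      simp only [pvDfsA]
      rw [if_neg (fun hc => hnotP ((PySem.Set.contains_iff _ _).mp hc))]
      by_cases h2 : node ∈ V
      · rw [if_pos ((PySem.Set.contains_iff _ _).mpr h2)]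
        refine ⟨V, rfl, ?_⟩
        intro x
        constructor
        · exact Or.inl
        · rintro (hx | hx)
          · exact hx
          · exact pvClosed_reach hVcl h2 hx
      · rw [if_neg (fun hc => h2 ((PySem.Set.contains_iff _ _).mp hc))]
        have hadd : PySem.Set.add P node = P ++ [node] := PySem.Set.add_of_not_mem hnotP
        have hP1nd : (P ++ [node]).Nodup := by
          rw [List.nodup_append]
          refine ⟨hPnd, List.nodup_singleton _, ?_⟩
          intro a ha b hb
          have hb' : b = node := by simpa using hb
          subst hb'
          exact fun h' => hnotP (h' ▸ ha)
        have hP1sub : ∀ p ∈ P ++ [node], p ∈ pvNodes m := by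
          intro p hp
          rcases List.mem_append.mp hp with h' | h'
          · exact hPsub p h'
          · have hpn : p = node := by simpa using h'
            rw [hpn]; exact hnodeN
        have hcssub : ∀ c ∈ pvGet m node, c ∈ pvNodes m :=
          fun c hc => pvE_tgt_nodes (hc : pvE m node c)
        have hpath1 : ∀ p ∈ P ++ [node], ∀ c ∈ pvGet m node, Relation.TransGen (pvE m) p c := by
          intro p hp c hc
          rcases List.mem_append.mp hp with h' | h'
          · exact (hpath p h').tail (hc : pvE m node c)
          · have hpn : p = node := by simpa using h'
            rw [hpn]
            exact Relation.TransGen.single (hc : pvE m node c)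
        have hfuel1 : (pvNodes m).length + 1 ≤ (P ++ [node]).length + fuel := by
          simp [List.length_append]; omega
        obtain ⟨V2, hres2, hchar2⟩ :=
          ih.2 (pvGet m node) (P ++ [node]) V hP1nd hP1sub hcssub hVcl hpath1 hfuel1
        refine ⟨PySem.Set.add V2 node, ?_, ?_⟩
        · rw [hadd, hres2]
          show (true, PySem.Set.discard (P ++ [node]) node, PySem.Set.add V2 node) = _
          rw [pv_discard_append hnotP]
        intro x
        rw [PySem.Set.mem_add, hchar2 x]
        constructor
        · rintro ((hx | ⟨c, hc, hcx⟩) | rfl)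
          · exact Or.inl hx
          · exact Or.inr (Relation.ReflTransGen.head (hc : pvE m node c) hcx)
          · exact Or.inr Relation.ReflTransGen.refl
        · rintro (hx | hx)
          · exact Or.inl (Or.inl hx)
          · rcases Relation.ReflTransGen.cases_head hx with heq | ⟨c, hec, hcx⟩
            · exact Or.inr heq.symm
            · exact Or.inl (Or.inr ⟨c, hec, hcx⟩)
    refine ⟨hdfs, ?_⟩
    intro cs
    induction cs with
    | nil =>
      intro P V _ _ _ _ _ _
      refine ⟨V, ?_, by simp⟩
      simp only [pvDfsAList]
    | cons c cs ihcs =>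
      intro P V hPnd hPsub hcssub hVcl hpath hfuel
      obtain ⟨V1, hres1, hchar1⟩ :=
        hdfs P V c hPnd hPsub (hcssub c List.mem_cons_self) hVcl
          (fun p hp => hpath p hp c List.mem_cons_self) hfuel
      have hV1cl : pvClosed m V1 := by
        intro u hu v he
        rcases (hchar1 u).mp hu with hu' | hu'
        · exact (hchar1 v).mpr (Or.inl (hVcl u hu' v he))
        · exact (hchar1 v).mpr (Or.inr (hu'.tail he))
      obtain ⟨V', hres', hchar'⟩ :=
        ihcs P V1 hPnd hPsub (fun c' hc' => hcssub c' (List.mem_cons_of_mem c hc')) hV1cl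
          (fun p hp c' hc' => hpath p hp c' (List.mem_cons_of_mem c hc')) hfuel
      refine ⟨V', ?_, ?_⟩
      · simp only [pvDfsAList]
        rw [hres1]
        show pvDfsAList m (fuel + 1) P V1 cs = (true, P, V')
        exact hres'
      · intro x
        rw [hchar' x, hchar1 x]
        constructor
        · rintro ((hx | hx) | ⟨c', hc', hx⟩)
          · exact Or.inl hx
          · exact Or.inr ⟨c, List.mem_cons_self, hx⟩
          · exact Or.inr ⟨c', List.mem_cons_of_mem c hc', hx⟩
        · rintro (hx | ⟨c', hc', hx⟩)
          · exact Or.inl (Or.inl hx)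
          · rcases List.mem_cons.mp hc' with rfl | hc''
            · exact Or.inl (Or.inr hx)
            · exact Or.inr ⟨c', hc'', hx⟩

-- A's two accumulator sets are ofList of the keys resp. of all listed children
lemma pvA_sets (m : List (String × List String)) :
    m.foldl (fun (s : PySem.Set String × PySem.Set String) pr =>
        (PySem.Set.add s.1 pr.1, pr.2.foldl PySem.Set.add s.2))
      (PySem.Set.empty, PySem.Set.empty) =
    (PySem.Set.ofList (m.map Prod.fst), PySem.Set.ofList (m.flatMap Prod.snd)) := by
  rw [PySem.List.foldl_prod_mk (f := fun s (pr : String × List String) => PySem.Set.add s pr.1)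
    (g := fun s (pr : String × List String) => pr.2.foldl PySem.Set.add s)]
  refine Prod.ext ?_ ?_
  · show m.foldl (fun s pr => PySem.Set.add s pr.1) [] = PySem.Set.ofList (m.map Prod.fst)
    rw [← PySem.Set.update_map_eq_foldl_add, PySem.Set.update_nil_left]
  · show m.foldl (fun s pr => pr.2.foldl PySem.Set.add s) [] = PySem.Set.ofList (m.flatMap Prod.snd)
    rw [PySem.Set.ofList_eq_foldl, List.foldl_flatMap]

lemma pvA_iff (m : List (String × List String)) (hk : (m.map Prod.fst).Nodup) :
    is_valid_git_tree m = true ↔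
      (PySem.Set.diff (PySem.Set.ofList (m.map Prod.fst)) (PySem.Set.ofList (m.flatMap Prod.snd))).length = 1 ∧
      pvNoCycle m := by
  have hNlen : (pvNodes m).length ≤ m.length + (m.flatMap Prod.snd).length := by
    show (PySem.Set.update (PySem.Set.ofList (m.map Prod.fst)) (PySem.Set.ofList (m.flatMap Prod.snd))).length ≤ _
    rw [PySem.Set.update_eq_append_filter, List.length_append]
    have h1 : (PySem.Set.ofList (m.map Prod.fst)).length ≤ m.length := by
      have := PySem.Set.length_ofList_le (m.map Prod.fst)
      simpa using this
    have h2 : (List.filter (fun y => !(PySem.Set.ofList (m.map Prod.fst)).contains y)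
        (PySem.Set.ofList (PySem.Set.ofList (m.flatMap Prod.snd)))).length ≤ (m.flatMap Prod.snd).length := by
      calc _ ≤ (PySem.Set.ofList (PySem.Set.ofList (m.flatMap Prod.snd))).length := List.filter_sublist.length_le
        _ ≤ (PySem.Set.ofList (m.flatMap Prod.snd)).length := PySem.Set.length_ofList_le _
        _ ≤ _ := PySem.Set.length_ofList_le _
    omega
  simp only [is_valid_git_tree, pvA_sets]
  by_cases hlen : (PySem.Set.diff (PySem.Set.ofList (m.map Prod.fst)) (PySem.Set.ofList (m.flatMap Prod.snd))).length = 1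
  · rw [if_neg (by simp only [PySem.Set.len, hlen]; simp)]
    obtain ⟨r, hr⟩ := List.length_eq_one_iff.mp hlen
    rw [hr]
    have hrD : r ∈ PySem.Set.diff (PySem.Set.ofList (m.map Prod.fst)) (PySem.Set.ofList (m.flatMap Prod.snd)) := by
      rw [hr]; exact List.mem_singleton_self r
    obtain ⟨hrP, hrnC⟩ := (PySem.Set.mem_diff _ _ _).mp hrD
    have hrN : r ∈ pvNodes m := (PySem.Set.mem_union _ _ _).mpr (Or.inl hrP)
    show (match pvDfsA m (m.length + (m.flatMap Prod.snd).length + 1) PySem.Set.empty PySem.Set.empty [r].headI with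
      | (false, _, _) => false
      | (true, _, visited) => PySem.Set.equal visited (PySem.Set.union (PySem.Set.ofList (m.map Prod.fst)) (PySem.Set.ofList (m.flatMap Prod.snd)))) = true ↔ _
    constructor
    · intro h
      refine ⟨by simp, ?_⟩
      rcases hA : pvDfsA m (m.length + (m.flatMap Prod.snd).length + 1) PySem.Set.empty PySem.Set.empty [r].headI with ⟨b, P', V'⟩
      rw [hA] at h
      cases b with
      | false => simp at h
      | true =>
        have heq : ∀ x, x ∈ V' ↔ x ∈ pvNodes m := (PySem.Set.equal_iff _ _).mp h
        have hsound := (pvDfsA_sound m _).1 _ _ _ _ _ hA (by intro v hv; simp [PySem.Set.empty] at hv)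
        intro u hcyc
        obtain ⟨c, hec, -⟩ := Relation.TransGen.head'_iff.mp hcyc
        have huV : u ∈ V' := (heq u).mpr (pvE_src_nodes hec)
        exact hsound.2.2 u huV u Relation.ReflTransGen.refl hcyc
    · rintro ⟨-, hnc⟩
      have hreachN : ∀ x, Relation.ReflTransGen (pvE m) r x → x ∈ pvNodes m := by
        intro x hx
        induction hx with
        | refl => exact hrN
        | tail _ e _ => exact pvE_tgt_nodes e
      obtain ⟨V', hres, hchar⟩ := (pvDfsA_complete m hnc _).1 PySem.Set.empty PySem.Set.empty [r].headI
        List.nodup_nil (by intro p hp; simp [PySem.Set.empty] at hp)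
        (by simpa using hrN)
        (by intro u hu; simp [PySem.Set.empty] at hu)
        (by intro p hp; simp [PySem.Set.empty] at hp)
        (by show (pvNodes m).length + 1 ≤ ([] : List String).length + (m.length + (m.flatMap Prod.snd).length + 1)
            simp only [List.length_nil]
            omega)
      rw [hres]
      show PySem.Set.equal V' (PySem.Set.union (PySem.Set.ofList (m.map Prod.fst)) (PySem.Set.ofList (m.flatMap Prod.snd))) = true
      rw [PySem.Set.equal_iff]
      intro x
      rw [hchar x]
      show x ∈ ([] : List String) ∨ _ ↔ x ∈ pvNodes m
      constructor
      · rintro (hx | hx)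
        · simp at hx
        · simpa using hreachN x hx
      · intro hx
        exact Or.inr (pv_all_reachable hk hr hnc x hx)
  · rw [if_pos (by simp only [PySem.Set.len]; exact_mod_cast hlen)]
    simp [hlen]

-- B-side: membership in one peel round
lemma pv_mem_peel {m : List (String × List String)} {s : PySem.Set String} {v : String} :
    v ∈ pvPeel m s ↔ v ∈ s ∧ ∃ u ∈ s, pvE m u v := by
  unfold pvPeel
  rw [PySem.Set.mem_ofList]
  simp only [List.mem_filter, List.any_eq_true, List.contains_iff_mem, pvE]

lemma pv_peel_nodup {m : List (String × List String)} {s : PySem.Set String} : (pvPeel m s).Nodup :=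
  PySem.Set.nodup_ofList _

-- every element of a closed chain has a predecessor in the chain
lemma pv_chain_pred {m : List (String × List String)} : ∀ (l : List String) (a : String),
    List.IsChain (pvE m) (a :: l) → ∀ v ∈ l, ∃ u ∈ a :: l, pvE m u v := by
  intro l
  induction l with
  | nil => intro a _ v hv; simp at hv
  | cons b t ih =>
    intro a hch v hv
    obtain ⟨hab, hbt⟩ := List.isChain_cons_cons.mp hch
    rcases List.mem_cons.mp hv with rfl | hv'
    · exact ⟨a, List.mem_cons_self, hab⟩
    · obtain ⟨u, hu, he⟩ := ih b hbt v hv'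
      exact ⟨u, List.mem_cons_of_mem a hu, he⟩

-- a cycle survives every peel round
lemma pv_cycle_survives {m : List (String × List String)} {x : String}
    (hc : Relation.TransGen (pvE m) x x) : ∀ k, x ∈ (pvPeel m)^[k] (pvNodes m) := by
  obtain ⟨c, hxc, hcx⟩ := Relation.TransGen.head'_iff.mp hc
  obtain ⟨l, hch, hlast⟩ := List.exists_isChain_cons_of_relationReflTransGen hcx
  have hchL : List.IsChain (pvE m) (x :: c :: l) := List.isChain_cons_cons.mpr ⟨hxc, hch⟩
  have hxin : x ∈ c :: l := hlast ▸ List.getLast_mem _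
  have hpred : ∀ v ∈ x :: c :: l, ∃ u ∈ x :: c :: l, pvE m u v := by
    intro v hv
    have hv2 : v ∈ c :: l := by
      rcases List.mem_cons.mp hv with h' | h'
      · rw [h']; exact hxin
      · exact h'
    exact pv_chain_pred _ x hchL v hv2
  have hall : ∀ k, ∀ v ∈ x :: c :: l, v ∈ (pvPeel m)^[k] (pvNodes m) := by
    intro k
    induction k with
    | zero =>
      intro v hv
      obtain ⟨u, _, he⟩ := hpred v hv
      exact pvE_tgt_nodes he
    | succ k ih =>
      intro v hv
      rw [Function.iterate_succ_apply']
      refine pv_mem_peel.mpr ⟨ih v hv, ?_⟩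
      obtain ⟨u, huL, he⟩ := hpred v hv
      exact ⟨u, ih u huL, he⟩
  exact fun k => hall k x List.mem_cons_self

-- with no cycle, |nodes| peel rounds empty the set
lemma pv_peel_empties {m : List (String × List String)} (hnc : pvNoCycle m) :
    (pvPeel m)^[(pvNodes m).length] (pvNodes m) = [] := by
  set A : Nat → PySem.Set String := fun k => (pvPeel m)^[k] (pvNodes m) with hA
  have hAsucc : ∀ k, A (k + 1) = pvPeel m (A k) := by
    intro k
    simp only [hA, Function.iterate_succ_apply']
  have hnodup : ∀ k, (A k).Nodup := by
    intro k
    cases k with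
    | zero =>
      exact PySem.Set.nodup_union _ _ (PySem.Set.nodup_ofList _)
    | succ k => rw [hAsucc]; exact pv_peel_nodup
  have hfilter : ∀ k, A (k + 1) = (A k).filter (fun v => (A k).any (fun u => (pvGet m u).contains v)) := by
    intro k
    rw [hAsucc]
    unfold pvPeel
    exact PySem.Set.ofList_eq_self_of_nodup _ ((hnodup k).filter _)
  have hmain : ∀ k, A k = [] ∨ (A k).length + k ≤ (pvNodes m).length := by
    intro k
    induction k with
    | zero => right; simp [hA]
    | succ k ih =>
      by_cases hAk : A k = []
      · left
        rw [hfilter k, hAk]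
        simp
      · by_cases heq : A (k + 1) = A k
        · exfalso
          have hall : ∀ v ∈ A k, ∃ u ∈ A k, pvE m u v := by
            intro v hv
            have := List.filter_eq_self.mp ((hfilter k).symm.trans heq) v hv
            simp only [List.any_eq_true, List.contains_iff_mem] at this
            exact this
          obtain ⟨x, hx⟩ := pv_cycle_of_all_pred m (A k) hAk hall
          exact hnc x hx
        · have hsubl : (A (k + 1)).Sublist (A k) := by
            rw [hfilter k]; exact List.filter_sublist
          have hlt : (A (k + 1)).length < (A k).length := by
            have hle := hsubl.length_le
            rcases Nat.lt_or_ge (A (k + 1)).length (A k).length with h' | h'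
            · exact h'
            · exact absurd ((List.Sublist.length_eq hsubl).mp (by omega)) heq
          rcases ih with h0 | hlen
          · exact absurd h0 hAk
          · right; omega
  rcases hmain (pvNodes m).length with h0 | hlen
  · exact h0
  · simp only [hA] at hlen
    exact List.eq_nil_iff_length_eq_zero.mpr (by omega)

lemma pv_foldl_range_iterate (f : PySem.Set String → PySem.Set String) :
    ∀ (n : Nat) (s : PySem.Set String), (List.range n).foldl (fun a _ => f a) s = f^[n] s := by
  intro n
  induction n with
  | zero => intro s; rfl
  | succ n ih =>
    intro s
    rw [List.range_succ, List.foldl_append, ih, Function.iterate_succ_apply']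
    rfl

lemma pvB_iff (m : List (String × List String)) :
    is_valid_git_tree_alt m = true ↔
      (PySem.Set.diff (PySem.Set.ofList (m.map Prod.fst)) (PySem.Set.ofList (m.flatMap Prod.snd))).length = 1 ∧
      pvNoCycle m := by
  unfold is_valid_git_tree_alt
  simp only [PySem.Set.len]
  rw [pv_foldl_range_iterate]
  by_cases hlen : (PySem.Set.diff (PySem.Set.ofList (m.map Prod.fst)) (PySem.Set.ofList (m.flatMap Prod.snd))).length = 1
  · have hc : ¬ ((PySem.Set.diff (PySem.Set.ofList (m.map Prod.fst)) (PySem.Set.ofList (m.flatMap Prod.snd))).length : Int) ≠ 1 := by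
      rw [hlen]; simp
    rw [if_neg hc]
    have hNodes : PySem.Set.union (PySem.Set.ofList (m.map Prod.fst)) (PySem.Set.ofList (m.flatMap Prod.snd)) = pvNodes m := rfl
    rw [hNodes]
    constructor
    · intro h
      refine ⟨hlen, ?_⟩
      intro u hcyc
      have hmem : u ∈ (pvPeel m)^[(pvNodes m).length] (pvNodes m) := pv_cycle_survives hcyc _
      have : (pvPeel m)^[(pvNodes m).length] (pvNodes m) = [] := by
        have h' := of_decide_eq_true h
        exact List.eq_nil_iff_length_eq_zero.mpr (by exact_mod_cast h')
      rw [this] at hmem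
      simp at hmem
    · rintro ⟨-, hnc⟩
      rw [pv_peel_empties hnc]
      simp
  · have hc : ((PySem.Set.diff (PySem.Set.ofList (m.map Prod.fst)) (PySem.Set.ofList (m.flatMap Prod.snd))).length : Int) ≠ 1 := by
      exact_mod_cast hlen
    rw [if_pos hc]
    simp [hlen]

-- ===== VERDICT (by name: the statement is the Claim_ definition above) =====
theorem is_valid_git_tree_spec : Claim_equal_is_valid_git_tree := by
  intro m _ hpre
  show _ = _
  have := (pvA_iff m hpre).trans (pvB_iff m).symm
  exact Bool.coe_iff_coe.mp this
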